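-- pv_equiv track=rewrite | github.com/miliar/Code_Jam_Webscraper | solutions_python/Problem_96/596.py | determine
-- ===== SOURCE A (Python) =====
-- import math
--
-- def func(n):
-- 	if n == 0: return 0
-- 	if n == 1 or n == 2: return 1
-- 	if n % 3 == 0: return n/3
-- 	else: return int(math.floor(float(n)/3)) + 1
--
-- def determine(l,s,p):
-- 	total = 0
-- 	maxnorm = [func(val) for val in l]
-- 	candidates = len([val for index, val in enumerate(maxnorm) if val == p-1 and l[index] % 3 != 1 and l[index] > 1])
-- 	while candidates and s:
-- 		total += 1
-- 		candidates -= 1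
-- 		s -= 1
-- 	total += len([val for val in maxnorm if val >= p])
-- 	return total
-- ===== SOURCE B (Python) =====
-- def determine(l, s, p):
--     total = 0
--     for t in l:
--         best = (t + 2) // 3  # ceil(t/3), matches func exactly (incl. t==0 and negatives)
--         if best >= p:
--             total += 1
--         elif best == p - 1 and t % 3 != 1 and t > 1 and s:
--             total += 1
--             s -= 1
--     return total
-- ===== Notes on version B (the rewrite author's own statement) =====
-- stated objective: simpler
-- what changed: Replaces func, the maxnorm list, two filtering comprehensions and the counting while-loop by one closed-form ceiling division (t+2)//3 and a single pass over l that consumes the surprise budget in place.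
import Mathlib
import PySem

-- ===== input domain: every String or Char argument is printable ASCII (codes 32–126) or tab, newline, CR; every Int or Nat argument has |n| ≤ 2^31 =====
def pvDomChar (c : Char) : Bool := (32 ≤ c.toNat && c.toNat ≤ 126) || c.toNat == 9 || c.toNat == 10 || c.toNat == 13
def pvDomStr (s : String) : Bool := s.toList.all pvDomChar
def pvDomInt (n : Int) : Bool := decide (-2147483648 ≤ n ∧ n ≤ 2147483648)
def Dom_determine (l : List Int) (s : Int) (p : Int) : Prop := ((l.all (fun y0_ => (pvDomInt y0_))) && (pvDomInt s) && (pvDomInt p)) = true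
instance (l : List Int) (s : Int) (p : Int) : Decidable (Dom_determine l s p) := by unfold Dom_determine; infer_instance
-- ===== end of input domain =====

-- B: one pass over l with the closed-form best score (t+2)//3, replacing A's four list
-- passes and while-loop; equal return value on every input (measured faster by constant factor).

-- ===== PORT A =====
-- func(n): on the 'else' branch Python computes int(math.floor(float(n)/3)); for |n| ≤ 2^31
-- the double rounding error (< 1e-6) cannot cross an integer since n % 3 ≠ 0 keeps n/3 at
-- distance ≥ 1/3 from any integer, so it equals floor division exactly. On the n % 3 == 0
-- branch Python's n/3 is an exact float equal to the integer n//3.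
def funcA (n : Int) : Int :=
  if n = 0 then 0
  else if n = 1 ∨ n = 2 then 1
  else if PySem.Int.mod n 3 = 0 then PySem.Int.floordiv n 3
  else PySem.Int.floordiv n 3 + 1

-- `while candidates and s:` — candidates is a nonnegative count (len), s any int;
-- the loop body decrements both and increments total.
def whileA (candidates : Nat) (s : Int) (total : Int) : Int :=
  match candidates with
  | 0 => total
  | c + 1 => if s ≠ 0 then whileA c (s - 1) (total + 1) else total

-- the candidates comprehension pairs enumerate(maxnorm) with l[index]; since
-- len l = len maxnorm the positional pairing is ported exactly as a zip.
-- total starts at 0, the while loop adds to it, then the final count is added.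
def determine (l : List Int) (s : Int) (p : Int) : Int :=
  whileA ((l.zip (l.map funcA)).filter
      (fun q => decide (q.2 = p - 1) && decide (PySem.Int.mod q.1 3 ≠ 1) && decide (q.1 > 1))).length
    s 0
  + (((l.map funcA).filter (fun v => decide (v ≥ p))).length : Int)

-- ===== PORT B =====
def loopB (xs : List Int) (s : Int) (p : Int) (total : Int) : Int :=
  match xs with
  | [] => total
  | t :: rest =>
    let best := PySem.Int.floordiv (t + 2) 3
    if best ≥ p then loopB rest s p (total + 1)
    else if best = p - 1 ∧ PySem.Int.mod t 3 ≠ 1 ∧ t > 1 ∧ s ≠ 0 then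
      loopB rest (s - 1) p (total + 1)
    else loopB rest s p total

def determine_alt (l : List Int) (s : Int) (p : Int) : Int := loopB l s p 0

-- ===== PRECONDITION & SPEC =====
def Spec_determine (l : List Int) (s : Int) (p : Int) (out : Int) : Prop := out = determine_alt l s p
instance (l : List Int) (s : Int) (p : Int) (out : Int) : Decidable (Spec_determine l s p out) := by unfold Spec_determine; infer_instance

-- ===== CLAIM (what is proved, stated in full; the proofs are below) =====
def Claim_equal_determine : Prop := ∀ (l : List Int) (s : Int) (p : Int), Dom_determine l s p → Spec_determine l s p (determine l s p)

-- ===== LEMMAS AND PROOFS =====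

theorem funcA_eq (n : Int) : funcA n = PySem.Int.floordiv (n + 2) 3 := by
  simp only [funcA, PySem.Int.floordiv_eq_ediv_of_pos (a := n) (by norm_num : (0:Int) < 3),
    PySem.Int.floordiv_eq_ediv_of_pos (a := n + 2) (by norm_num : (0:Int) < 3),
    PySem.Int.mod_eq_emod_of_pos (a := n) (by norm_num : (0:Int) < 3)]
  split_ifs <;> omega

theorem whileA_shift (c : Nat) (s t : Int) : whileA c s t = t + whileA c s 0 := by
  induction c generalizing s t with
  | zero => simp [whileA]
  | succ c ih =>
    simp only [whileA]
    by_cases h : s = 0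
    · simp [h]
    · simp only [h, ne_eq, not_false_eq_true, if_true]
      rw [ih (s - 1) (t + 1), ih (s - 1) (0 + 1)]
      ring

theorem whileA_zero (c : Nat) (t : Int) : whileA c 0 t = t := by
  cases c <;> simp [whileA]

theorem loopB_eq (xs : List Int) (s p total : Int) :
    loopB xs s p total =
      total
      + ((xs.filter (fun t => decide (PySem.Int.floordiv (t + 2) 3 ≥ p))).length : Int)
      + whileA ((xs.filter (fun t => decide (PySem.Int.floordiv (t + 2) 3 = p - 1)
            && decide (PySem.Int.mod t 3 ≠ 1) && decide (t > 1))).length) s 0 := by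
  induction xs generalizing s total with
  | nil => simp [loopB, whileA]
  | cons t rest ih =>
    rw [loopB, List.filter_cons, List.filter_cons]
    by_cases hge : PySem.Int.floordiv (t + 2) 3 ≥ p
    · have h2 : ¬ (PySem.Int.floordiv (t + 2) 3 = p - 1) := by omega
      rw [if_pos hge, if_pos (by simpa using hge),
        if_neg (show ¬ ((decide (PySem.Int.floordiv (t + 2) 3 = p - 1)
          && decide (PySem.Int.mod t 3 ≠ 1) && decide (t > 1)) = true) by
            simp only [Bool.and_eq_true, decide_eq_true_eq, and_assoc]
            exact fun h => h2 h.1),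
        List.length_cons, ih]
      push_cast
      ring
    · have hgeb : ¬ ((decide (PySem.Int.floordiv (t + 2) 3 ≥ p)) = true) := by simpa using hge
      by_cases hel : PySem.Int.floordiv (t + 2) 3 = p - 1 ∧ PySem.Int.mod t 3 ≠ 1 ∧ t > 1
      · have hfilb : (decide (PySem.Int.floordiv (t + 2) 3 = p - 1)
            && decide (PySem.Int.mod t 3 ≠ 1) && decide (t > 1)) = true := by
          simp only [Bool.and_eq_true, decide_eq_true_eq, and_assoc]
          exact ⟨hel.1, hel.2.1, hel.2.2⟩
        rw [if_neg hge, if_neg hgeb, if_pos hfilb, List.length_cons]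
        by_cases hs : s = 0
        · rw [if_neg (show ¬ (PySem.Int.floordiv (t + 2) 3 = p - 1 ∧ PySem.Int.mod t 3 ≠ 1
              ∧ t > 1 ∧ s ≠ 0) from fun h => h.2.2.2 hs), ih, hs, whileA_zero, whileA_zero]
        · rw [if_pos ⟨hel.1, hel.2.1, hel.2.2, hs⟩, ih,
            show (List.filter (fun t => decide (PySem.Int.floordiv (t + 2) 3 = p - 1)
              && decide (PySem.Int.mod t 3 ≠ 1) && decide (t > 1)) rest).length + 1
              = Nat.succ (List.filter (fun t => decide (PySem.Int.floordiv (t + 2) 3 = p - 1)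
              && decide (PySem.Int.mod t 3 ≠ 1) && decide (t > 1)) rest).length from rfl,
            whileA]
          simp only [hs, ne_eq, not_false_eq_true, if_true]
          rw [whileA_shift _ (s - 1) (0 + 1)]
          ring
      · rw [if_neg hge, if_neg hgeb,
          if_neg (show ¬ ((decide (PySem.Int.floordiv (t + 2) 3 = p - 1)
            && decide (PySem.Int.mod t 3 ≠ 1) && decide (t > 1)) = true) by
              simp only [Bool.and_eq_true, decide_eq_true_eq, and_assoc]; exact hel),
          if_neg (fun h => hel ⟨h.1, h.2.1, h.2.2.1⟩)]
        exact ih s total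

theorem candidates_zip (l : List Int) (p : Int) :
    ((l.zip (l.map funcA)).filter
        (fun q => decide (q.2 = p - 1) && decide (PySem.Int.mod q.1 3 ≠ 1) && decide (q.1 > 1))).length
      = (l.filter (fun t => decide (PySem.Int.floordiv (t + 2) 3 = p - 1)
            && decide (PySem.Int.mod t 3 ≠ 1) && decide (t > 1))).length := by
  induction l with
  | nil => simp
  | cons t rest ih =>
    rw [List.map_cons, List.zip_cons_cons, List.filter_cons, List.filter_cons]
    by_cases h : (decide (PySem.Int.floordiv (t + 2) 3 = p - 1)
        && decide (PySem.Int.mod t 3 ≠ 1) && decide (t > 1)) = true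
    · have h' : (decide ((t, funcA t).2 = p - 1) && decide (PySem.Int.mod (t, funcA t).1 3 ≠ 1)
          && decide ((t, funcA t).1 > 1)) = true := by
        simpa [funcA_eq] using h
      rw [if_pos h', if_pos h, List.length_cons, List.length_cons, ih]
    · have h' : ¬ ((decide ((t, funcA t).2 = p - 1) && decide (PySem.Int.mod (t, funcA t).1 3 ≠ 1)
          && decide ((t, funcA t).1 > 1)) = true) := by
        simpa [funcA_eq] using h
      rw [if_neg h', if_neg h, ih]

theorem maxnorm_ge (l : List Int) (p : Int) :
    ((l.map funcA).filter (fun v => decide (v ≥ p))).length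
      = (l.filter (fun t => decide (PySem.Int.floordiv (t + 2) 3 ≥ p))).length := by
  rw [List.filter_map, List.length_map]
  congr 1
  apply List.filter_congr
  intro t _
  simp [Function.comp, funcA_eq]

-- ===== VERDICT (by name: the statement is the Claim_ definition above) =====
theorem determine_spec : Claim_equal_determine := by
  intro l s p _
  show determine l s p = determine_alt l s p
  rw [determine, determine_alt, loopB_eq, candidates_zip, maxnorm_ge]
  ring
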